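-- pv_equiv track=rewrite | github.com/Randosky/Algorithms | 2.2/Проверка 3.py | search
-- ===== SOURCE A (Python) =====
-- def search(leg_array, arm_array):
--     min_item = float("inf")
--     min_item_ind = 0
--     for k in range(len(leg_array)):
--         max_btw_arrays = leg_array[k] if leg_array[k] > arm_array[k] else arm_array[k]
--         if max_btw_arrays <= min_item:
--             min_item = max_btw_arrays
--             min_item_ind = k
--     return min_item_ind
-- ===== SOURCE B (Python) =====
-- def search(leg_array, arm_array):
--     maxes = [leg_array[k] if leg_array[k] > arm_array[k] else arm_array[k]
--              for k in range(len(leg_array))]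
--     if not maxes:
--         return 0
--     m = min(maxes)
--     for k in range(len(maxes) - 1, -1, -1):
--         if maxes[k] == m:
--             return k
-- ===== Notes on version B (the rewrite author's own statement) =====
-- stated objective: alternative
-- what changed: Replaces the single interleaved loop that tracks a running minimum and index with a three-stage pipeline: build the table of elementwise maxima, take its minimum, then scan backwards for the first (= last overall) index attaining it, which reproduces A's <=-overwrite tie-break.
import Mathlib
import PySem

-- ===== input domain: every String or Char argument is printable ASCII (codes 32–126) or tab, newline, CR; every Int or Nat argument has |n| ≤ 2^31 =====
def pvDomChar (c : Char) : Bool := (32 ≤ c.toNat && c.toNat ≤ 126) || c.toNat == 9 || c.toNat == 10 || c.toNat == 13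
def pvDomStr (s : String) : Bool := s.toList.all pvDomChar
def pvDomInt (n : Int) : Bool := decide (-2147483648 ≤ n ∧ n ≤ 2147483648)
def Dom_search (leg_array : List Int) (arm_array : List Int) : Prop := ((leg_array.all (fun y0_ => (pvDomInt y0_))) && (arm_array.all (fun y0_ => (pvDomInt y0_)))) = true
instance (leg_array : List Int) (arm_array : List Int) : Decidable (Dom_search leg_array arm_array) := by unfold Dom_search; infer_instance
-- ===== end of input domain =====

-- B replaces A's single interleaved running-minimum loop by a pipeline: build the table of
-- elementwise maxima, take its minimum, then scan backwards for the last index attaining it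
-- (objective: alternative decomposition, same O(n) cost).


-- ===== PORT A =====
-- min_item starts at float("inf"): modelled as `none` (every int is ≤ it); leg_array[k]/arm_array[k]
-- via pyGetD, total under Pre_search (Python raises IndexError when arm_array is shorter).
def search (leg_array : List Int) (arm_array : List Int) : Int :=
  ((PySem.List.pyRange 0 leg_array.length 1).foldl
    (fun (st : Option Int × Int) k =>
      let max_btw_arrays :=
        if PySem.List.pyGetD leg_array k 0 > PySem.List.pyGetD arm_array k 0
        then PySem.List.pyGetD leg_array k 0 else PySem.List.pyGetD arm_array k 0
      match st.1 with
      | none => (some max_btw_arrays, k)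
      | some min_item => if max_btw_arrays ≤ min_item then (some max_btw_arrays, k) else st)
    (none, 0)).2

-- ===== PORT B =====
def search_alt (leg_array : List Int) (arm_array : List Int) : Int :=
  let maxes := (PySem.List.pyRange 0 leg_array.length 1).map
    (fun k =>
      if PySem.List.pyGetD leg_array k 0 > PySem.List.pyGetD arm_array k 0
      then PySem.List.pyGetD leg_array k 0 else PySem.List.pyGetD arm_array k 0)
  if maxes = [] then 0
  else
    let m := (PySem.List.min? maxes (fun y => y)).getD 0
    ((PySem.List.pyRange ((maxes.length : Int) - 1) (-1) (-1)).find?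
      (fun k => PySem.List.pyGetD maxes k 0 == m)).getD 0

-- ===== PRECONDITION & SPEC =====
-- Pre_ excludes exactly the inputs where the Python raises IndexError (arm_array shorter than leg_array).
def Pre_search (leg_array : List Int) (arm_array : List Int) : Prop :=
  leg_array.length ≤ arm_array.length
instance (leg_array : List Int) (arm_array : List Int) : Decidable (Pre_search leg_array arm_array) := by unfold Pre_search; infer_instance
def pvWitness_search : List Int × List Int := ([3, 1, 1, 5], [2, 4, 1, 0])

def Spec_search (leg_array : List Int) (arm_array : List Int) (out : Int) : Prop := out = search_alt leg_array arm_array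
instance (leg_array : List Int) (arm_array : List Int) (out : Int) : Decidable (Spec_search leg_array arm_array out) := by unfold Spec_search; infer_instance

-- ===== CLAIM (what is proved, stated in full; the proofs are below) =====
def Claim_equal_search : Prop := ∀ (leg_array : List Int) (arm_array : List Int), Dom_search leg_array arm_array → Pre_search leg_array arm_array → Spec_search leg_array arm_array (search leg_array arm_array)

-- ===== LEMMAS AND PROOFS =====

-- abstract both ports over the table of maxima
def pvStep (ys : List Int) (st : Option Int × Int) (k : Int) : Option Int × Int :=
  let m := PySem.List.pyGetD ys k 0
  match st.1 with
  | none => (some m, k)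
  | some mi => if m ≤ mi then (some m, k) else st

def pvAfold (ys : List Int) : Option Int × Int :=
  (PySem.List.pyRange 0 ys.length 1).foldl (pvStep ys) (none, 0)

def pvBmin (ys : List Int) : Int := (PySem.List.min? ys (fun y => y)).getD 0

def pvBidx (ys : List Int) : Int :=
  ((PySem.List.pyRange ((ys.length : Int) - 1) (-1) (-1)).find?
    (fun k => PySem.List.pyGetD ys k 0 == pvBmin ys)).getD 0

theorem pv_find?_congr {α : Type} (l : List α) (p q : α → Bool)
    (h : ∀ x ∈ l, p x = q x) : l.find? p = l.find? q := by
  induction l with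
  | nil => rfl
  | cons a t ih =>
    simp only [List.find?]
    rw [h a (by simp)]
    cases q a
    · exact ih (fun x hx => h x (by simp [hx]))
    · rfl

theorem pv_pyGetD_append_left (ys : List Int) (x : Int) (k : Int)
    (h0 : 0 ≤ k) (hk : k < (ys.length : Int)) :
    PySem.List.pyGetD (ys ++ [x]) k 0 = PySem.List.pyGetD ys k 0 := by
  rw [PySem.List.pyGetD_eq_getElem (ys ++ [x]) 0 h0 (by simp; omega),
      PySem.List.pyGetD_eq_getElem ys 0 h0 hk]
  exact List.getElem_append_left (by omega)

theorem pv_bmin_append (y : Int) (t : List Int) (x : Int) :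
    pvBmin ((y :: t) ++ [x]) = min (pvBmin (y :: t)) x := by
  simp only [pvBmin, List.cons_append, PySem.List.min?_id_cons, Option.getD_some,
    List.foldl_append, List.foldl_cons, List.foldl_nil]

-- the backward scan on ys ++ [x] first tests index ys.length, then behaves like the scan on ys
theorem pv_bidx_cons (ys : List Int) (x : Int) :
    pvBidx (ys ++ [x]) =
      (if x == pvBmin (ys ++ [x]) then some ((ys.length : Int))
       else (PySem.List.pyRange ((ys.length : Int) - 1) (-1) (-1)).find?
              (fun k => PySem.List.pyGetD ys k 0 == pvBmin (ys ++ [x]))).getD 0 := by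
  unfold pvBidx
  have hlen : (((ys ++ [x]).length : Int) - 1) = (ys.length : Int) := by simp
  rw [hlen, PySem.List.pyRange_neg_one_cons (by omega : (-1 : Int) < (ys.length : Int))]
  have hx : PySem.List.pyGetD (ys ++ [x]) (ys.length : Int) 0 = x := by
    rw [PySem.List.pyGetD_natCast]
    simp
  cases hxb : (x == pvBmin (ys ++ [x])) with
  | true =>
    rw [List.find?_cons_of_pos (by simp [hx, hxb]), if_pos (by simp)]
  | false =>
    rw [List.find?_cons_of_neg (by simp [hx]; simpa using hxb), if_neg (by simp)]
    congr 1
    apply pv_find?_congr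
    intro k hk
    rw [PySem.List.mem_pyRange_neg_one] at hk
    rw [pv_pyGetD_append_left ys x k (by omega) (by omega)]

-- main invariant: A's fold state is (min of the table, last index attaining it)
theorem pv_main (ys : List Int) (h : ys ≠ []) :
    pvAfold ys = (some (pvBmin ys), pvBidx ys) := by
  induction ys using List.reverseRecOn with
  | nil => exact absurd rfl h
  | append_singleton ys x ih =>
    rcases List.eq_nil_or_concat ys with hnil | _
    · subst hnil
      simp only [pvAfold, pvBmin, pvBidx, List.nil_append]
      norm_num [PySem.List.pyRange, PySem.List.min?, pvStep, PySem.List.pyGetD_natCast,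
        List.find?]
    · have hys : ys ≠ [] := by rintro rfl; simp_all
      -- unfold the A-side fold one step from the right
      have hrange : PySem.List.pyRange 0 ((ys ++ [x]).length : Int) 1 =
          PySem.List.pyRange 0 (ys.length : Int) 1 ++ [(ys.length : Int)] := by
        have : ((ys ++ [x]).length : Int) = (ys.length : Int) + 1 := by simp
        rw [this, PySem.List.pyRange_one_succ_right (by positivity)]
      have hcong : (PySem.List.pyRange 0 (ys.length : Int) 1).foldl (pvStep (ys ++ [x])) (none, 0)
          = pvAfold ys := by
        apply PySem.List.foldl_congr_mem
        intro acc k hk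
        rw [PySem.List.mem_pyRange_one] at hk
        simp only [pvStep, pv_pyGetD_append_left ys x k hk.1 hk.2]
      have hx : PySem.List.pyGetD (ys ++ [x]) (ys.length : Int) 0 = x := by
        rw [PySem.List.pyGetD_natCast]; simp
      have hA : pvAfold (ys ++ [x]) = pvStep (ys ++ [x]) (pvAfold ys) (ys.length : Int) := by
        show (PySem.List.pyRange 0 ((ys ++ [x]).length : Int) 1).foldl (pvStep (ys ++ [x])) (none, 0) = _
        rw [hrange, List.foldl_append]
        simp only [List.foldl_cons, List.foldl_nil]
        rw [hcong]
      rw [hA, ih hys]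
      obtain ⟨y, t, rfl⟩ : ∃ y t, ys = y :: t := by
        cases ys with | nil => exact absurd rfl hys | cons y t => exact ⟨y, t, rfl⟩
      rw [pv_bidx_cons (y :: t) x, pv_bmin_append y t x]
      have hx' : PySem.List.pyGetD (y :: (t ++ [x])) ((t.length : Int) + 1) 0 = x := by
        simpa using hx
      by_cases hle : x ≤ pvBmin (y :: t)
      · have hmin : min (pvBmin (y :: t)) x = x := by omega
        simp [pvStep, hx', hle]
      · have hmin : min (pvBmin (y :: t)) x = pvBmin (y :: t) := by omega
        have hne : (x == pvBmin (y :: t)) = false := by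
          simp only [beq_eq_false_iff_ne, ne_eq]; omega
        rw [hmin, hne]
        simp only [Bool.false_eq_true, if_false]
        simp only [List.cons_append] at hx' ⊢
        simp [pvStep, hx', hle, pvBidx]

-- a port-side bridge: search/search_alt expressed through the abstractions
theorem pv_search_eq (leg arm : List Int) :
    search leg arm = (pvAfold ((PySem.List.pyRange 0 (leg.length : Int) 1).map
      (fun k => if PySem.List.pyGetD leg k 0 > PySem.List.pyGetD arm k 0
                then PySem.List.pyGetD leg k 0 else PySem.List.pyGetD arm k 0))).2 := by
  set f := fun k => if PySem.List.pyGetD leg k 0 > PySem.List.pyGetD arm k 0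
                    then PySem.List.pyGetD leg k 0 else PySem.List.pyGetD arm k 0 with hf
  set ys := (PySem.List.pyRange 0 (leg.length : Int) 1).map f with hys
  have hlen : (ys.length : Int) = (leg.length : Int) := by
    simp [hys, PySem.List.length_pyRange_one]
  unfold search pvAfold
  rw [hlen]
  congr 1
  apply PySem.List.foldl_congr_mem
  intro acc k hk
  rw [PySem.List.mem_pyRange_one] at hk
  have hget : PySem.List.pyGetD ys k 0 = f k := by
    exact PySem.List.pyGetD_map_pyRange_of_nonneg f _ k 0 hk.1 hk.2
  simp only [pvStep, hget, hf]

-- ===== VERDICT (by name: the statement is the Claim_ definition above) =====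
theorem search_spec : Claim_equal_search := by
  intro leg arm _ _
  unfold Spec_search search_alt
  set f := fun k => if PySem.List.pyGetD leg k 0 > PySem.List.pyGetD arm k 0
                    then PySem.List.pyGetD leg k 0 else PySem.List.pyGetD arm k 0 with hf
  set ys := (PySem.List.pyRange 0 (leg.length : Int) 1).map f with hys
  rw [pv_search_eq leg arm]
  by_cases hnil : ys = []
  · rw [if_pos hnil]
    have : pvAfold ys = (none, 0) := by
      unfold pvAfold
      simp [hnil]
    rw [this]
  · rw [if_neg hnil, pv_main ys hnil]
    rfl
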